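-- pv_equiv track=rewrite | github.com/Abhichal18/Leetcode | January 2023/minimum_rounds_to_complete_all_tasks.py | minimumRounds
-- ===== SOURCE A (Python) =====
-- from typing import List
--
-- def minimumRounds(tasks: List[int]) -> int:
--     # stores frequency of difficulty levels
--     d=dict()
--     for i in tasks:
--         # if difficulty level already in dictionary increment it by 1
--         # else create the difficulty level in dictionary and set it to 1
--         if i in d:
--             d[i]+=1
--         else:
--             d[i]=1
--     # stores the min no of rounds to complete all the tasks
--     min_rounds=0
--     # iterating in dictionary
--     for i in d:
--         # if the frequency of difficulty level is 1
--         # we can't complete the tasks. So, returning -1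
--         if d[i]==1:
--             return -1
--         else:
--             # if frequency of difficulty level is divisible by 3
--             # we are adding the quotient into min_rounds
--             if d[i]%3==0:
--                 min_rounds+=d[i]//3
--             # if not disible by 3 we add (quotient+1) into min_rounds
--             else:
--                 min_rounds+=(d[i]//3)+1
--     return min_rounds
-- ===== SOURCE B (Python) =====
-- from typing import List
--
-- def minimumRounds(tasks: List[int]) -> int:
--     # sort a copy, then count lengths of maximal runs of equal values
--     total = 0
--     cur = None
--     cnt = 0
--     for x in sorted(tasks):
--         if cur == x:
--             cnt += 1
--         else:
--             if cnt == 1: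
--                 return -1
--             if cnt:
--                 total += (cnt + 2) // 3
--             cur = x
--             cnt = 1
--     if cnt == 1:
--         return -1
--     if cnt:
--         total += (cnt + 2) // 3
--     return total
-- ===== Notes on version B (the rewrite author's own statement) =====
-- stated objective: alternative
-- what changed: Replaces A's frequency-dictionary pass (and dict iteration) by sorting a copy of tasks and counting lengths of maximal runs of equal values in one scan, adding (run+2)//3 per run and returning -1 on a run of length 1.
import Mathlib
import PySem

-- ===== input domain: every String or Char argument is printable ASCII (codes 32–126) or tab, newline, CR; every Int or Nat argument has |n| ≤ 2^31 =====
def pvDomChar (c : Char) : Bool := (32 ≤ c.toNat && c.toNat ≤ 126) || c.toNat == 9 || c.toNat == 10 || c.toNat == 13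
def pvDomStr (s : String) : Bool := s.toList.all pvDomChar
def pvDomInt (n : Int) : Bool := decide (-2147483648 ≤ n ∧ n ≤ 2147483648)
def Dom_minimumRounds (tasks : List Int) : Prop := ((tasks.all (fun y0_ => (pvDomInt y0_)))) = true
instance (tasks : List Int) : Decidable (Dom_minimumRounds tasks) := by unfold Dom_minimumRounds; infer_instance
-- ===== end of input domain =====

-- B replaces A's frequency dictionary by sort-then-count-runs (same value, different algorithm; no speed claim).

-- ===== PORT A =====
-- the dict-building loop: if i in d: d[i] += 1 else: d[i] = 1
def pvBuildA (tasks : List Int) : PySem.Dict Int Int :=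
  tasks.foldl
    (fun d i => if d.contains i then d.insert i (d.getD i 0 + 1) else d.insert i 1)
    PySem.Dict.empty

-- the second loop over the dict's keys, with the early 'return -1'
def pvLoopA (d : PySem.Dict Int Int) (ks : List Int) (min_rounds : Int) : Int :=
  match ks with
  | [] => min_rounds
  | k :: ks =>
    if d.getD k 0 = 1 then -1
    else
      if PySem.Int.mod (d.getD k 0) 3 = 0 then
        pvLoopA d ks (min_rounds + PySem.Int.floordiv (d.getD k 0) 3)
      else
        pvLoopA d ks (min_rounds + (PySem.Int.floordiv (d.getD k 0) 3 + 1))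

def minimumRounds (tasks : List Int) : Int :=
  pvLoopA (pvBuildA tasks) (pvBuildA tasks).keys 0

-- ===== PORT B =====
-- walk sorted(tasks) tracking the current value and its run length; flush a run on change and at the end
def pvLoopB (cur : Option Int) (cnt total : Int) (l : List Int) : Int :=
  match l with
  | [] =>
    if cnt = 1 then -1
    else if cnt ≠ 0 then total + PySem.Int.floordiv (cnt + 2) 3 else total
  | x :: rest =>
    if cur = some x then pvLoopB cur (cnt + 1) total rest
    else
      if cnt = 1 then -1
      else
        pvLoopB (some x) 1
          (if cnt ≠ 0 then total + PySem.Int.floordiv (cnt + 2) 3 else total) rest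

def minimumRounds_alt (tasks : List Int) : Int :=
  pvLoopB none 0 0 (PySem.List.sorted tasks (fun x => x) false)

-- ===== PRECONDITION & SPEC =====
def Spec_minimumRounds (tasks : List Int) (out : Int) : Prop := out = minimumRounds_alt tasks
instance (tasks : List Int) (out : Int) : Decidable (Spec_minimumRounds tasks out) := by unfold Spec_minimumRounds; infer_instance

-- ===== CLAIM (what is proved, stated in full; the proofs are below) =====
def Claim_equal_minimumRounds : Prop := ∀ (tasks : List Int), Dom_minimumRounds tasks → Spec_minimumRounds tasks (minimumRounds tasks)

-- ===== LEMMAS AND PROOFS =====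

-- ceil(c/3) as A computes it branch-wise
def pvF3 (c : Int) : Int := if c % 3 = 0 then c / 3 else c / 3 + 1

lemma pvF3_ediv (c : Int) : (c + 2) / 3 = pvF3 c := by
  unfold pvF3; split <;> omega

lemma pvF3_floordiv (c : Int) : PySem.Int.floordiv (c + 2) 3 = pvF3 c := by
  rw [PySem.Int.floordiv_eq_ediv_of_pos (by norm_num)]
  exact pvF3_ediv c

lemma pvBuildA_eq_counter (tasks : List Int) : pvBuildA tasks = PySem.Dict.counter tasks := by
  unfold pvBuildA
  rw [← PySem.Dict.foldl_insert_getD_add_one_eq_counter]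
  congr 1
  funext d i
  by_cases h : d.contains i = true
  · simp [h]
  · have h0 : d.getD i 0 = 0 := PySem.Dict.getD_of_not_contains d 0 (by simpa using h)
    simp [h, h0]

lemma pvLoopA_char (tasks : List Int) (ks : List Int) (acc : Int) :
    pvLoopA (PySem.Dict.counter tasks) ks acc =
      if ∃ k ∈ ks, tasks.count k = 1 then -1
      else acc + (ks.map (fun k => pvF3 (tasks.count k))).sum := by
  induction ks generalizing acc with
  | nil => simp [pvLoopA]
  | cons k ks ih =>
    rw [pvLoopA]
    rw [PySem.Dict.getD_counter, PySem.Int.mod_eq_emod_of_pos (by norm_num),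
      PySem.Int.floordiv_eq_ediv_of_pos (by norm_num)]
    by_cases h1 : tasks.count k = 1
    · simp [h1]
    · have hc1 : ¬ ((tasks.count k : Int) = 1) := by exact_mod_cast h1
      have hcond : (∃ k' ∈ k :: ks, tasks.count k' = 1) ↔ (∃ k' ∈ ks, tasks.count k' = 1) := by
        constructor
        · rintro ⟨w, hw, hw1⟩
          rcases List.mem_cons.mp hw with rfl | hw
          · exact absurd hw1 h1
          · exact ⟨w, hw, hw1⟩
        · rintro ⟨w, hw, hw1⟩; exact ⟨w, List.mem_cons_of_mem _ hw, hw1⟩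
      have step : ∀ add : Int,
          (if ∃ k' ∈ ks, tasks.count k' = 1 then (-1 : Int)
            else acc + add + (ks.map (fun k => pvF3 (tasks.count k))).sum) =
          (if ∃ k' ∈ k :: ks, tasks.count k' = 1 then (-1 : Int)
            else acc + (add + (ks.map (fun k => pvF3 (tasks.count k))).sum)) := by
        intro add
        by_cases hex : ∃ k' ∈ ks, tasks.count k' = 1
        · rw [if_pos hex, if_pos (hcond.mpr hex)]
        · rw [if_neg hex, if_neg (fun h => hex (hcond.mp h))]
          ring
      by_cases h3 : ((tasks.count k : Int)) % 3 = 0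
      · rw [if_neg hc1, if_pos h3, ih, step]
        simp only [List.map_cons, List.sum_cons, pvF3, if_pos h3]
      · rw [if_neg hc1, if_neg h3, ih, step]
        simp only [List.map_cons, List.sum_cons, pvF3, if_neg h3]

-- the common closed form both programs compute
lemma minimumRounds_eq_spec (tasks : List Int) :
    minimumRounds tasks =
      if ∃ w ∈ tasks, tasks.count w = 1 then -1
      else ∑ w ∈ tasks.toFinset, pvF3 (tasks.count w) := by
  unfold minimumRounds
  rw [pvBuildA_eq_counter, PySem.Dict.keys_counter, ← PySem.List.dedup_eq_ofList,
    pvLoopA_char]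
  have hmem : ∀ w, w ∈ PySem.List.dedup tasks ↔ w ∈ tasks := fun w => PySem.List.mem_dedup tasks w
  have hcond : (∃ k ∈ PySem.List.dedup tasks, tasks.count k = 1) ↔ (∃ w ∈ tasks, tasks.count w = 1) := by
    constructor
    · rintro ⟨w, hw, h1⟩; exact ⟨w, (hmem w).mp hw, h1⟩
    · rintro ⟨w, hw, h1⟩; exact ⟨w, (hmem w).mpr hw, h1⟩
  by_cases hex : ∃ w ∈ tasks, tasks.count w = 1
  · rw [if_pos (hcond.mpr hex), if_pos hex]
  · rw [if_neg (fun h => hex (hcond.mp h)), if_neg hex]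
    have hfin : (PySem.List.dedup tasks).toFinset = tasks.toFinset := by
      ext a; simp [List.mem_toFinset]
    rw [← hfin, List.sum_toFinset _ (PySem.List.nodup_dedup tasks)]
    simp

lemma pv_sum_cons (x : Int) (rest : List Int) :
    ∑ w ∈ (x :: rest).toFinset, pvF3 ((x :: rest).count w) =
      pvF3 (rest.count x + 1) + ∑ w ∈ rest.toFinset.erase x, pvF3 (rest.count w) := by
  rw [List.toFinset_cons]
  have hins : insert x rest.toFinset = insert x (rest.toFinset.erase x) := by
    ext a
    simp only [Finset.mem_insert, Finset.mem_erase]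
    constructor
    · rintro (rfl | h)
      · exact Or.inl rfl
      · by_cases hax : a = x
        · exact Or.inl hax
        · exact Or.inr ⟨hax, h⟩
    · rintro (rfl | ⟨_, h⟩)
      · exact Or.inl rfl
      · exact Or.inr h
  rw [hins, Finset.sum_insert (Finset.notMem_erase x _)]
  congr 1
  · simp
  · refine Finset.sum_congr rfl (fun w hw => ?_)
    have hwx : w ≠ x := (Finset.mem_erase.mp hw).1
    simp [Ne.symm hwx]

lemma pv_exists_cons (x : Int) (rest : List Int) :
    (∃ w ∈ x :: rest, (x :: rest).count w = 1) ↔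
      (rest.count x + 1 = 1 ∨ ∃ w ∈ rest, w ≠ x ∧ rest.count w = 1) := by
  constructor
  · rintro ⟨w, hw, h1⟩
    by_cases hwx : w = x
    · subst hwx; left; simpa [List.count_cons] using h1
    · right
      refine ⟨w, ?_, hwx, ?_⟩
      · rcases List.mem_cons.mp hw with rfl | h
        · exact absurd rfl hwx
        · exact h
      · simpa [List.count_cons, Ne.symm hwx] using h1
  · rintro (h | ⟨w, hw, hwx, h1⟩)
    · exact ⟨x, List.mem_cons_self, by simpa [List.count_cons] using h⟩
    · exact ⟨w, List.mem_cons_of_mem _ hw, by simpa [List.count_cons, Ne.symm hwx] using h1⟩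

lemma pvLoopB_run (s : List Int) (hs : s.Pairwise (· ≤ ·)) :
    ∀ (v c total : Int), 1 ≤ c → (∀ y ∈ s, v ≤ y) →
      pvLoopB (some v) c total s =
        if c + (s.count v : Int) = 1 ∨ ∃ w ∈ s, w ≠ v ∧ s.count w = 1 then -1
        else total + pvF3 (c + s.count v) + ∑ w ∈ s.toFinset.erase v, pvF3 (s.count w) := by
  induction s with
  | nil =>
    intro v c total hc _
    by_cases h1 : c = 1
    · have hyes : c + ((List.count v ([] : List Int)) : Int) = 1 ∨
          ∃ w ∈ ([] : List Int), w ≠ v ∧ List.count w ([] : List Int) = 1 :=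
        Or.inl (by simp [h1])
      rw [if_pos hyes]
      simp [pvLoopB, h1]
    · have hno : ¬ (c + ((List.count v ([] : List Int)) : Int) = 1 ∨
          ∃ w ∈ ([] : List Int), w ≠ v ∧ List.count w ([] : List Int) = 1) := by
        rintro (h | ⟨w, hw, _⟩)
        · simp at h; omega
        · simp at hw
      rw [if_neg hno]
      have hc0 : c ≠ 0 := by omega
      have harg : c + ((List.count v ([] : List Int)) : Int) = c := by simp
      rw [harg]
      simp [pvLoopB, h1, hc0, pvF3_ediv]
  | cons x rest ih =>
    intro v c total hc hall
    have hxr : ∀ y ∈ rest, x ≤ y := fun y hy => (List.pairwise_cons.mp hs).1 y hy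
    have hrest : rest.Pairwise (· ≤ ·) := (List.pairwise_cons.mp hs).2
    by_cases hvx : v = x
    · subst hvx
      rw [pvLoopB, if_pos rfl, ih hrest v (c + 1) total (by omega)
        (fun y hy => hxr y hy)]
      have hcond : (c + (((v :: rest).count v) : Int) = 1 ∨
          ∃ w ∈ v :: rest, w ≠ v ∧ (v :: rest).count w = 1) ↔
          (c + 1 + (rest.count v : Int) = 1 ∨ ∃ w ∈ rest, w ≠ v ∧ rest.count w = 1) := by
        rw [List.count_cons_self]
        constructor
        · rintro (h | ⟨w, hw, hwv, h1⟩)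
          · left; omega
          · right
            refine ⟨w, ?_, hwv, ?_⟩
            · rcases List.mem_cons.mp hw with rfl | h; · exact absurd rfl hwv
              · exact h
            · simpa [List.count_cons, Ne.symm hwv] using h1
        · rintro (h | ⟨w, hw, hwv, h1⟩)
          · left; omega
          · exact Or.inr ⟨w, List.mem_cons_of_mem _ hw, hwv, by simpa [List.count_cons, Ne.symm hwv] using h1⟩
      rw [show (if c + ((v :: rest).count v : Int) = 1 ∨
            ∃ w ∈ v :: rest, w ≠ v ∧ (v :: rest).count w = 1 then (-1 : Int)
          else total + pvF3 (c + ((v :: rest).count v : Int)) +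
            ∑ w ∈ (v :: rest).toFinset.erase v, pvF3 ((v :: rest).count w)) =
          (if c + 1 + (rest.count v : Int) = 1 ∨ ∃ w ∈ rest, w ≠ v ∧ rest.count w = 1 then (-1 : Int)
          else total + pvF3 (c + 1 + (rest.count v : Int)) +
            ∑ w ∈ rest.toFinset.erase v, pvF3 (rest.count w)) from ?_]
      have hset : (v :: rest).toFinset.erase v = rest.toFinset.erase v := by
        rw [List.toFinset_cons, Finset.erase_insert_eq_erase]
      by_cases hcnd : c + 1 + (rest.count v : Int) = 1 ∨ ∃ w ∈ rest, w ≠ v ∧ rest.count w = 1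
      · rw [if_pos (hcond.mpr hcnd), if_pos hcnd]
      · rw [if_neg (fun h => hcnd (hcond.mp h)), if_neg hcnd]
        rw [List.count_cons_self, hset]
        congr 1
        · push_cast
          ring_nf
        · refine Finset.sum_congr rfl (fun w hw => ?_)
          have hwv : w ≠ v := (Finset.mem_erase.mp hw).1
          simp [Ne.symm hwv]
    · -- v < x, so v does not occur in x :: rest
      have hvlt : v < x := lt_of_le_of_ne (hall x (List.mem_cons_self)) hvx
      have hvnot : v ∉ x :: rest := by
        intro hv
        rcases List.mem_cons.mp hv with rfl | hv
        · exact lt_irrefl v hvlt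
        · exact absurd (lt_of_lt_of_le hvlt (hxr v hv)) (lt_irrefl v)
      have hv0 : (x :: rest).count v = 0 := List.count_eq_zero.mpr hvnot
      rw [pvLoopB, if_neg (by simpa using fun h => hvx h)]
      by_cases hc1 : c = 1
      · rw [if_pos hc1, if_pos (Or.inl (by rw [hv0]; push_cast; omega))]
      · rw [if_neg hc1]
        have hcne : c ≠ 0 := by omega
        rw [if_pos hcne, pvF3_floordiv]
        rw [ih hrest x 1 (total + pvF3 c) le_rfl hxr]
        have hcond : (c + ((x :: rest).count v : Int) = 1 ∨
            ∃ w ∈ x :: rest, w ≠ v ∧ (x :: rest).count w = 1) ↔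
            ((1 : Int) + (rest.count x : Int) = 1 ∨ ∃ w ∈ rest, w ≠ x ∧ rest.count w = 1) := by
          rw [hv0]
          constructor
          · rintro (h | ⟨w, hw, _, h1⟩)
            · push_cast at h; omega
            · rcases (pv_exists_cons x rest).mp ⟨w, hw, h1⟩ with h | h
              · left; push_cast; omega
              · exact Or.inr h
          · intro h
            have : ∃ w ∈ x :: rest, (x :: rest).count w = 1 := by
              apply (pv_exists_cons x rest).mpr
              rcases h with h | h
              · left; omega
              · exact Or.inr h
            rcases this with ⟨w, hw, h1⟩
            exact Or.inr ⟨w, hw, fun hwv => hvnot (hwv ▸ hw), h1⟩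
        by_cases hcnd : (1 : Int) + (rest.count x : Int) = 1 ∨ ∃ w ∈ rest, w ≠ x ∧ rest.count w = 1
        · rw [if_pos hcnd, if_pos (hcond.mpr hcnd)]
        · rw [if_neg hcnd, if_neg (fun h => hcnd (hcond.mp h))]
          have hererase : (x :: rest).toFinset.erase v = (x :: rest).toFinset :=
            Finset.erase_eq_self.mpr (by simpa [List.mem_toFinset] using hvnot)
          rw [hererase, pv_sum_cons, hv0]
          have h1 : pvF3 (c + ((0:Nat):Int)) = pvF3 c := by norm_num
          rw [h1]
          have h2 : pvF3 ((1:Int) + (rest.count x : Int)) = pvF3 ((rest.count x : Int) + 1) := by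
            congr 1; ring
          rw [h2]; ring

lemma pvLoopB_top (s : List Int) (hpw : s.Pairwise (· ≤ ·)) :
    pvLoopB none 0 0 s =
      if ∃ w ∈ s, s.count w = 1 then -1 else ∑ w ∈ s.toFinset, pvF3 (s.count w) := by
  match s, hpw with
  | [], _ => simp [pvLoopB]
  | x :: rest, hpw =>
    have hxr : ∀ y ∈ rest, x ≤ y := fun y hy => (List.pairwise_cons.mp hpw).1 y hy
    have hrest : rest.Pairwise (· ≤ ·) := (List.pairwise_cons.mp hpw).2
    rw [pvLoopB]
    rw [if_neg (by simp), if_neg (by norm_num : ¬ ((0:Int) = 1)),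
      if_neg (by simp : ¬ ((0:Int) ≠ 0))]
    rw [pvLoopB_run rest hrest x 1 0 le_rfl hxr]
    by_cases hcnd : ∃ w ∈ x :: rest, (x :: rest).count w = 1
    · have h' := (pv_exists_cons x rest).mp hcnd
      have hl : (1:Int) + (rest.count x : Int) = 1 ∨ ∃ w ∈ rest, w ≠ x ∧ rest.count w = 1 := by
        rcases h' with h | h
        · left; omega
        · exact Or.inr h
      rw [if_pos hl, if_pos hcnd]
    · have hl : ¬ ((1:Int) + (rest.count x : Int) = 1 ∨ ∃ w ∈ rest, w ≠ x ∧ rest.count w = 1) := by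
        intro h
        apply hcnd
        apply (pv_exists_cons x rest).mpr
        rcases h with h | h
        · left; omega
        · exact Or.inr h
      rw [if_neg hl, if_neg hcnd, pv_sum_cons]
      have h2 : pvF3 ((1:Int) + (rest.count x : Int)) = pvF3 ((rest.count x : Int) + 1) := by
        congr 1; push_cast; omega
      rw [h2]; ring

lemma minimumRounds_alt_eq_spec (tasks : List Int) :
    minimumRounds_alt tasks =
      if ∃ w ∈ tasks, tasks.count w = 1 then -1
      else ∑ w ∈ tasks.toFinset, pvF3 (tasks.count w) := by
  unfold minimumRounds_alt
  have hperm : (PySem.List.sorted tasks (fun x => x) false).Perm tasks :=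
    PySem.List.sorted_perm tasks (fun x => x) false
  have hpw : (PySem.List.sorted tasks (fun x => x) false).Pairwise (· ≤ ·) := by
    simpa using PySem.List.sorted_pairwise (xs := tasks) (key := fun x => x)
  have hcnt : ∀ w, (PySem.List.sorted tasks (fun x => x) false).count w = tasks.count w :=
    fun w => hperm.count_eq w
  have hfin : (PySem.List.sorted tasks (fun x => x) false).toFinset = tasks.toFinset := by
    ext a; simp [List.mem_toFinset, hperm.mem_iff]
  rw [pvLoopB_top _ hpw]
  by_cases hex2 : ∃ w ∈ tasks, tasks.count w = 1
  · rcases hex2 with ⟨w, hw, h1⟩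
    rw [if_pos ⟨w, hperm.mem_iff.mpr hw, by rwa [hcnt w]⟩, if_pos ⟨w, hw, h1⟩]
  · rw [if_neg (fun h => hex2 (by
        rcases h with ⟨w, hw, h1⟩
        exact ⟨w, hperm.mem_iff.mp hw, by rwa [hcnt w] at h1⟩)), if_neg hex2, hfin]
    exact Finset.sum_congr rfl (fun w _ => by rw [hcnt w])

-- ===== VERDICT (by name: the statement is the Claim_ definition above) =====
theorem minimumRounds_spec : Claim_equal_minimumRounds := by
  intro tasks _
  unfold Spec_minimumRounds
  rw [minimumRounds_eq_spec, minimumRounds_alt_eq_spec]
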